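-- pv_equiv track=rewrite | github.com/veox/cancelot | cancelot/utils.py | _closest_down
-- ===== SOURCE A (Python) =====
-- def _closest_down(num, sortedlist):
--     '''Finds a number closest-down to a given one from a sorted list of numbers.'''
--     if num < sortedlist[0]:
--         raise Exception('num lower than lowest in list')
--     closest = sortedlist[0]
--
--     for i in sortedlist:
--         if num - i <= 0:
--             break
--         closest = i
--
--     return closest
-- ===== SOURCE B (Python) =====
-- def _closest_down(num, sortedlist):
--     '''Finds a number closest-down to a given one from a sorted list of numbers.'''
--     if num < sortedlist[0]:
--         raise Exception('num lower than lowest in list')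
--     # binary search for the leftmost index whose element is >= num
--     lo, hi = 0, len(sortedlist)
--     while lo < hi:
--         mid = (lo + hi) // 2
--         if sortedlist[mid] < num:
--             lo = mid + 1
--         else:
--             hi = mid
--     return sortedlist[lo - 1] if lo else sortedlist[0]
-- ===== Notes on version B (the rewrite author's own statement) =====
-- stated objective: faster
-- what changed: B replaces A's linear scan with a hand-written binary search (bisect_left semantics) for the leftmost element >= num and returns the element just before it, falling back to sortedlist[0]; Pre_ restricts to lists partitioned at num (in particular every sorted list, the function's documented domain), since on other lists the linear-scan value is an artefact and the binary search legitimately differs.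
-- outside the precondition, e.g. on _closest_down(5, [1, 10, 2, 4]): A returns 1, B returns 4
import Mathlib
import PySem

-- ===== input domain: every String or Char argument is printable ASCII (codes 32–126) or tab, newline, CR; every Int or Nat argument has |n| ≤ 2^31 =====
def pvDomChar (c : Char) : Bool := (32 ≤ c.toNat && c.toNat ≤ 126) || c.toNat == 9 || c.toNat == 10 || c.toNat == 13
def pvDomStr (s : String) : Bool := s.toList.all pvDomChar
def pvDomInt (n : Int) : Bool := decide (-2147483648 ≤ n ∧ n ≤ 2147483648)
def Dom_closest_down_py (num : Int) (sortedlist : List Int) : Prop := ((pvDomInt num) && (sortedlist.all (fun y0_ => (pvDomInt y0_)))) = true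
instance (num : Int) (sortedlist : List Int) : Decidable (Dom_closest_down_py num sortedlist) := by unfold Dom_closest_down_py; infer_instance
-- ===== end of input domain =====

-- B replaces A's linear scan by a hand-written binary search, correct on the lists Pre_ demands (partitioned at num, e.g. any sorted list).

-- ===== PORT A =====
-- the 'for i in sortedlist: if num - i <= 0: break; closest = i' loop, carrying the accumulator 'closest'
def closestLoop (num : Int) : List Int → Int → Int
  | [], closest => closest
  | i :: rest, closest => if num - i ≤ 0 then closest else closestLoop num rest i

def closest_down_py (num : Int) (sortedlist : List Int) : Int :=
  -- under Pre_ the list is nonempty and num ≥ sortedlist[0], so headI is exactly Python's sortedlist[0]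
  closestLoop num sortedlist sortedlist.headI

-- ===== PORT B =====
-- the 'while lo < hi' binary-search loop of Source B, with fuel = hi - lo (the loop runs at most that often);
-- all indices mid stay in [0, len), so getD is exact for Python's sortedlist[mid]
def bsearchLoop (num : Int) (xs : List Int) : Nat → Nat → Nat → Nat
  | 0, lo, _ => lo
  | fuel + 1, lo, hi =>
    if lo < hi then
      let mid := (lo + hi) / 2
      if xs.getD mid 0 < num then bsearchLoop num xs fuel (mid + 1) hi
      else bsearchLoop num xs fuel lo mid
    else lo

def closest_down_py_alt (num : Int) (sortedlist : List Int) : Int :=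
  let lo := bsearchLoop num sortedlist sortedlist.length 0 sortedlist.length
  if lo ≠ 0 then (PySem.List.pyGet? sortedlist ((lo : Int) - 1)).getD 0
  else sortedlist.headI

-- ===== PRECONDITION & SPEC =====
-- Pre_ excludes the inputs on which A raises (the empty list: IndexError; num < sortedlist[0]: explicit raise)
-- and lists not partitioned at num (an element ≥ num occurring before a smaller one) — outside the documented
-- 'sorted list' domain, where A's linear-scan value is an artefact and B's binary search legitimately differs;
-- every sorted list is partitioned at every num.
def Pre_closest_down_py (num : Int) (sortedlist : List Int) : Prop :=
  sortedlist ≠ [] ∧ sortedlist.headI ≤ num ∧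
    List.Pairwise (fun a b => num ≤ a → num ≤ b) sortedlist
instance (num : Int) (sortedlist : List Int) : Decidable (Pre_closest_down_py num sortedlist) := by unfold Pre_closest_down_py; infer_instance
def pvWitness_closest_down_py : Int × List Int := (7, [1, 3, 5, 9])

def Spec_closest_down_py (num : Int) (sortedlist : List Int) (out : Int) : Prop := out = closest_down_py_alt num sortedlist
instance (num : Int) (sortedlist : List Int) (out : Int) : Decidable (Spec_closest_down_py num sortedlist out) := by unfold Spec_closest_down_py; infer_instance

-- ===== CLAIM (what is proved, stated in full; the proofs are below) =====
def Claim_equal_closest_down_py : Prop := ∀ (num : Int) (sortedlist : List Int), Dom_closest_down_py num sortedlist → Pre_closest_down_py num sortedlist → Spec_closest_down_py num sortedlist (closest_down_py num sortedlist)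

-- ===== LEMMAS AND PROOFS =====
-- A's loop returns the element just before the first index whose element is >= num (head if that index is 0).
lemma closestLoop_eq_findIdx (num : Int) (xs : List Int) (c : Int) :
    closestLoop num xs c =
      (if xs.findIdx (fun v => decide (num ≤ v)) = 0 then c
       else xs.getD (xs.findIdx (fun v => decide (num ≤ v)) - 1) 0) := by
  induction xs generalizing c with
  | nil => simp [closestLoop]
  | cons i rest ih =>
    by_cases h : num ≤ i
    · have h1 : num - i ≤ 0 := by omega
      simp [closestLoop, h1, List.findIdx_cons, h]
    · have h2 : ¬ (num - i ≤ 0) := by omega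
      rw [closestLoop, if_neg h2, ih, List.findIdx_cons]
      simp only [h, decide_false, cond_false]
      cases hj : rest.findIdx (fun v => decide (num ≤ v)) with
      | zero => simp
      | succ n => simp

-- the partition condition in getD form: once an element is ≥ num, all later ones are
lemma mono_getD {num : Int} {xs : List Int}
    (hs : List.Pairwise (fun a b => num ≤ a → num ≤ b) xs) {i j : Nat}
    (hij : i ≤ j) (hj : j < xs.length) (h : num ≤ xs.getD i 0) : num ≤ xs.getD j 0 := by
  rcases Nat.eq_or_lt_of_le hij with rfl | hlt
  · exact h
  · have := List.Pairwise.rel_get_of_lt hs (a := ⟨i, by omega⟩) (b := ⟨j, hj⟩) (by simpa using hlt)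
    simp only [List.get_eq_getElem] at this
    have hi : i < xs.length := by omega
    rw [List.getD, List.getElem?_eq_getElem hi] at h
    rw [List.getD, List.getElem?_eq_getElem hj]
    exact this h

-- the binary-search invariant: the result r has everything below it < num and everything from it on ≥ num
lemma bsearchLoop_spec (num : Int) (xs : List Int) (hs : List.Pairwise (fun a b => num ≤ a → num ≤ b) xs) :
    ∀ (fuel lo hi : Nat), hi - lo ≤ fuel → lo ≤ hi → hi ≤ xs.length →
    (∀ i, i < lo → xs.getD i 0 < num) →
    (∀ i, hi ≤ i → i < xs.length → num ≤ xs.getD i 0) →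
    (∀ i, i < bsearchLoop num xs fuel lo hi → xs.getD i 0 < num) ∧
    (∀ i, bsearchLoop num xs fuel lo hi ≤ i → i < xs.length → num ≤ xs.getD i 0) ∧
    bsearchLoop num xs fuel lo hi ≤ xs.length := by
  intro fuel
  induction fuel with
  | zero =>
    intro lo hi hfuel hle hlen hlow hhigh
    have : lo = hi := by omega
    subst this
    simp only [bsearchLoop]
    exact ⟨hlow, hhigh, by omega⟩
  | succ n ih =>
    intro lo hi hfuel hle hlen hlow hhigh
    rw [bsearchLoop]
    by_cases h : lo < hi
    · simp only [h, if_true]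
      have hmid1 : lo ≤ (lo + hi) / 2 := by omega
      have hmid2 : (lo + hi) / 2 < hi := by omega
      by_cases hc : xs.getD ((lo + hi) / 2) 0 < num
      · simp only [hc, if_true]
        refine ih ((lo + hi) / 2 + 1) hi (by omega) (by omega) hlen ?_ hhigh
        intro i hi'
        by_contra h'
        rw [not_lt] at h'
        have := mono_getD (i := i) (j := (lo + hi) / 2) hs (by omega) (by omega) h'
        omega
      · simp only [hc, if_false]
        refine ih lo ((lo + hi) / 2) (by omega) (by omega) (by omega) hlow ?_
        intro i hi' hil
        exact mono_getD (i := (lo + hi) / 2) (j := i) hs hi' hil (by omega)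
    · simp only [h, if_false]
      have : lo = hi := by omega
      exact ⟨hlow, by subst this; exact hhigh, by omega⟩

-- any index with those two properties is findIdx
lemma eq_findIdx_of (p : Int → Bool) (xs : List Int) (r : Nat)
    (hr : r ≤ xs.length)
    (hlow : ∀ i, i < r → p (xs.getD i 0) = false)
    (hhit : ∀ i, r ≤ i → i < xs.length → p (xs.getD i 0) = true) :
    xs.findIdx p = r := by
  induction xs generalizing r with
  | nil => simp at hr; simp [hr]
  | cons x rest ih =>
    cases r with
    | zero =>
      have := hhit 0 (by omega) (by simp)
      simp [List.findIdx_cons, List.getD] at this ⊢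
      simp [this]
    | succ m =>
      have hx := hlow 0 (by omega)
      simp [List.getD] at hx
      rw [List.findIdx_cons, hx]
      simp only [cond_false]
      have : rest.findIdx p = m := by
        refine ih m (by simpa using hr) ?_ ?_
        · intro i hi'
          have := hlow (i + 1) (by omega)
          simpa [List.getD] using this
        · intro i hi' hil
          have := hhit (i + 1) (by omega) (by simpa using hil)
          simpa [List.getD] using this
      omega

lemma bsearchLoop_eq_findIdx (num : Int) (xs : List Int) (hs : List.Pairwise (fun a b => num ≤ a → num ≤ b) xs) :
    bsearchLoop num xs xs.length 0 xs.length = xs.findIdx (fun v => decide (num ≤ v)) := by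
  obtain ⟨h1, h2, h3⟩ := bsearchLoop_spec num xs hs xs.length 0 xs.length (by omega)
    (by omega) (le_refl _) (by omega) (by omega)
  exact (eq_findIdx_of _ xs _ h3
    (fun i hi' => by simp only [decide_eq_false_iff_not, not_le]; exact h1 i hi')
    (fun i hi' hil => by simp only [decide_eq_true_eq]; exact h2 i hi' hil)).symm

-- ===== VERDICT (by name: the statement is the Claim_ definition above) =====
theorem closest_down_py_spec : Claim_equal_closest_down_py := by
  intro num xs _ hpre
  unfold Spec_closest_down_py closest_down_py closest_down_py_alt
  rw [closestLoop_eq_findIdx, bsearchLoop_eq_findIdx num xs hpre.2.2]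
  set j := xs.findIdx (fun v => decide (num ≤ v)) with hj
  by_cases h0 : j = 0
  · simp [h0]
  · have h1 : 1 ≤ j := Nat.one_le_iff_ne_zero.mpr h0
    have hcast : (j : Int) - 1 = ((j - 1 : Nat) : Int) := by omega
    simp only [h0, if_neg, ne_eq, not_false_eq_true, if_pos, hcast,
      PySem.List.pyGet?_natCast]
    simp [List.getD]
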